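-- pv_equiv track=rewrite | github.com/mistraali/pp1 | 05-Test1/mock/p6.py | f
-- ===== SOURCE A (Python) =====
-- def f(number,even):
--     sum = 0
--     cipher = lambda a : a%10
--     while number > 0:
--         if not(even) == cipher(number)%2:
--             sum += cipher(number)
--         number//=10
--     return sum
-- ===== SOURCE B (Python) =====
-- def f(number, even):
--     if number <= 0:
--         return 0
--     want = 0 if even else 1
--     return sum(int(c) for c in str(number) if int(c) % 2 == want)
-- ===== Notes on version B (the rewrite author's own statement) =====
-- stated objective: idiomatic
-- what changed: B replaces the divide-by-10 while loop that mutates the number with a conversion to the decimal string and a filtered comprehension summed over its characters.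
import Mathlib
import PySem

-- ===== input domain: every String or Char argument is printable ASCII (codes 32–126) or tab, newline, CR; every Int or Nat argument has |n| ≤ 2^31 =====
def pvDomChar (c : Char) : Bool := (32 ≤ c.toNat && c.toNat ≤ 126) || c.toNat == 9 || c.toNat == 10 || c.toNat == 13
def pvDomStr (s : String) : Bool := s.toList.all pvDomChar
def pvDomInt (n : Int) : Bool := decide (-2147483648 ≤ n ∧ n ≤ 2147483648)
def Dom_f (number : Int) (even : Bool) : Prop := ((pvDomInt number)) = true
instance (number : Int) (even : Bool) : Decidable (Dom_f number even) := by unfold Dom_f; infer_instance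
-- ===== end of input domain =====

-- B replaces A's divide-by-10 while loop with the idiomatic pass over the characters of str(number); return values proved equal.

-- ===== PORT A =====
-- termination of A's loop: number//10 shrinks while number > 0
theorem pvFdiv10_toNat_lt (n : Int) (h : 0 < n) :
    (PySem.Int.floordiv n 10).toNat < n.toNat := by
  unfold PySem.Int.floordiv
  rw [Int.fdiv_eq_ediv_of_nonneg _ (by norm_num)]
  omega

-- the while loop of A: state (number, sum); `cipher a = a % 10`; Python's bool-int comparison
-- makes `not(even)` the integer 0/1
def fLoop (even : Bool) (number : Int) (sum : Int) : Int :=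
  if h : 0 < number then
    fLoop even (PySem.Int.floordiv number 10)
      (if (if even then (0 : Int) else 1) = PySem.Int.mod (PySem.Int.mod number 10) 2
       then sum + PySem.Int.mod number 10 else sum)
  else sum
termination_by number.toNat
decreasing_by exact pvFdiv10_toNat_lt _ h

def f (number : Int) (even : Bool) : Int := fLoop even number 0

-- ===== PORT B =====
-- `if number <= 0: return 0`, then sum int(c) over the characters of str(number) whose parity
-- matches; int(c) on the digit characters produced by str(number) is exactly c.toNat - 48
def f_alt (number : Int) (even : Bool) : Int :=
  if number ≤ 0 then 0
  else
    let want : Int := if even then 0 else 1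
    (((PySem.Int.toChars number).map (fun c => ((c.toNat : Int) - 48))).filter
      (fun d => PySem.Int.mod d 2 == want)).foldl (· + ·) 0

-- ===== PRECONDITION & SPEC =====
def Spec_f (number : Int) (even : Bool) (out : Int) : Prop := out = f_alt number even
instance (number : Int) (even : Bool) (out : Int) : Decidable (Spec_f number even out) := by unfold Spec_f; infer_instance

-- ===== CLAIM (what is proved, stated in full; the proofs are below) =====
def Claim_equal_f : Prop := ∀ (number : Int) (even : Bool), Dom_f number even → Spec_f number even (f number even)

-- ===== LEMMAS AND PROOFS =====

-- the contribution of one digit d (< 10)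
def pvSel (even : Bool) (d : Nat) : Int :=
  if d % 2 = (if even then 0 else 1) then (d : Int) else 0

-- reference digit sum, least-significant digit first
def pvS (even : Bool) (n : Nat) : Int :=
  if n = 0 then 0 else pvSel even (n % 10) + pvS even (n / 10)
termination_by n
decreasing_by exact Nat.div_lt_self (by omega) (by norm_num)

theorem pvS_pos (even : Bool) (n : Nat) (h : n ≠ 0) :
    pvS even n = pvSel even (n % 10) + pvS even (n / 10) := by
  conv_lhs => rw [pvS]
  rw [if_neg h]

-- decimal digit characters of n, most-significant first (mirrors Nat.toDigitsCore's accumulator)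
def pvDigChars (n : Nat) : List Char :=
  if n / 10 = 0 then [Nat.digitChar (n % 10)]
  else pvDigChars (n / 10) ++ [Nat.digitChar (n % 10)]
termination_by n
decreasing_by exact Nat.div_lt_self (by omega) (by norm_num)

theorem pvMod10 (m : Nat) : PySem.Int.mod (m : Int) 10 = ((m % 10 : Nat) : Int) := by
  unfold PySem.Int.mod; rw [Int.fmod_eq_emod]; push_cast; simp

theorem pvMod2 (m : Nat) : PySem.Int.mod (m : Int) 2 = ((m % 2 : Nat) : Int) := by
  unfold PySem.Int.mod; rw [Int.fmod_eq_emod]; push_cast; simp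

theorem pvFdiv10 (m : Nat) : PySem.Int.floordiv (m : Int) 10 = ((m / 10 : Nat) : Int) := by
  unfold PySem.Int.floordiv
  rw [Int.fdiv_eq_ediv_of_nonneg _ (by norm_num)]; push_cast; simp

theorem pvDigitChar_val (d : Nat) (h : d < 10) :
    ((Nat.digitChar d).toNat : Int) - 48 = (d : Int) := by
  interval_cases d <;> decide

-- A's loop computes acc + pvS
theorem pvLoop_eq (even : Bool) : ∀ n acc, fLoop even (n : Nat) acc = acc + pvS even n := by
  intro n
  induction n using Nat.strong_induction_on with
  | _ n ih =>
    intro acc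
    rw [fLoop]
    by_cases h0 : n = 0
    · subst h0; simp [pvS]
    · have hpos : 0 < ((n : Nat) : Int) := by exact_mod_cast Nat.pos_of_ne_zero h0
      rw [dif_pos hpos]
      rw [pvMod10, pvMod2, pvFdiv10]
      rw [ih (n / 10) (Nat.div_lt_self (Nat.pos_of_ne_zero h0) (by norm_num))]
      rw [pvS_pos even n h0]
      unfold pvSel
      by_cases hc : n % 10 % 2 = (if even then 0 else 1)
      · rw [if_pos hc, if_pos (by cases even <;> simp_all)]
        ring
      · rw [if_neg hc, if_neg (by cases even <;> simp_all)]
        ring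

-- Nat.toDigitsCore with enough fuel is pvDigChars plus the accumulator
theorem pvToDigitsCore_eq : ∀ fuel n ds, n < fuel →
    Nat.toDigitsCore 10 fuel n ds = pvDigChars n ++ ds := by
  intro fuel
  induction fuel with
  | zero => intro n ds h; omega
  | succ fuel ih =>
    intro n ds h
    rw [Nat.toDigitsCore, pvDigChars]
    by_cases hz : n / 10 = 0
    · simp [hz]
    · rw [if_neg hz]
      simp only [hz, if_false]
      have hn : 0 < n := by by_contra hc; push_neg at hc; interval_cases n; simp at hz
      rw [ih (n / 10) _ (by have := Nat.div_lt_self hn (by norm_num : (1:Nat) < 10); omega)]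
      simp

-- B's filtered character sum over a single digit character
theorem pvSingleton_sum (even : Bool) (d : Nat) (hd : d < 10) :
    (([Nat.digitChar d].map (fun c => ((c.toNat : Int) - 48))).filter
      (fun x => PySem.Int.mod x 2 == (if even then (0:Int) else 1))).sum = pvSel even d := by
  simp only [List.map_cons, List.map_nil, pvDigitChar_val d hd, List.filter, pvMod2, pvSel]
  by_cases hc : d % 2 = (if even then 0 else 1)
  · simp [hc]
  · have h2 : ((d : Int) % 2 == if even then (0:Int) else 1) = false := by
      have hcast : ((d : Int) % 2) = ((d % 2 : Nat) : Int) := by push_cast; ring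
      rw [hcast]; cases even <;> simp_all
    simp [h2, hc]

-- B's filtered character sum over pvDigChars equals pvS
theorem pvChars_sum (even : Bool) : ∀ n : Nat,
    (((pvDigChars n).map (fun c => ((c.toNat : Int) - 48))).filter
      (fun x => PySem.Int.mod x 2 == (if even then (0:Int) else 1))).sum = pvS even n := by
  intro n
  induction n using Nat.strong_induction_on with
  | _ n ih =>
    rw [pvDigChars]
    by_cases hz : n / 10 = 0
    · rw [if_pos hz]
      rw [pvSingleton_sum even (n % 10) (Nat.mod_lt _ (by norm_num))]
      by_cases h0 : n = 0
      · subst h0; simp [pvS, pvSel]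
      · rw [pvS_pos even n h0, hz, pvS, if_pos rfl]; ring
    · rw [if_neg hz]
      have hn : 0 < n := by by_contra h; push_neg at h; interval_cases n; simp at hz
      rw [List.map_append, List.filter_append, List.sum_append]
      rw [ih (n / 10) (Nat.div_lt_self hn (by norm_num))]
      rw [pvSingleton_sum even (n % 10) (Nat.mod_lt _ (by norm_num))]
      rw [pvS_pos even n (by omega)]
      ring

-- ===== VERDICT (by name: the statement is the Claim_ definition above) =====
theorem f_spec : Claim_equal_f := by
  intro number even _
  unfold Spec_f f f_alt
  by_cases h : number ≤ 0
  · rw [if_pos h, fLoop, dif_neg (by omega)]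
  · push_neg at h
    rw [if_neg (by omega)]
    have hcast : number = ((number.toNat : Nat) : Int) := by omega
    rw [hcast, pvLoop_eq even number.toNat 0, zero_add]
    have htd : PySem.Int.toChars ((number.toNat : Nat) : Int) = pvDigChars number.toNat := by
      unfold PySem.Int.toChars
      rw [if_neg (by omega)]
      simp only [Int.toNat_natCast]
      rw [Nat.toDigits, pvToDigitsCore_eq (number.toNat + 1) number.toNat [] (by omega)]
      simp
    rw [htd, ← List.sum_eq_foldl]
    exact (pvChars_sum even number.toNat).symm
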